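-- pv_equiv track=rewrite | github.com/CreedAventuss/Enigma-Machine | main.py | generate_alpha
-- ===== SOURCE A (Python) =====
-- alpha = ['A', 'B', 'C', 'D', 'E', 'F', 'G', 'H', 'I', 'J', 'K', 'L', 'M',
--          'N', 'O', 'P', 'Q', 'R', 'S', 'T', 'U', 'V', 'W', 'X', 'Y', 'Z',
--          '0', '1', '2', '3', '4', '5', '6', '7', '8', '9', ' ']
--
-- def generate_alpha(key_num):
--     new_alpha = []
--     for i in range(key_num, len(alpha) + key_num):
--         if i < len(alpha):
--             new_alpha.append(alpha[i])
--         else: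
--             index = i % len(alpha)
--             new_alpha.append(alpha[index])
--     return new_alpha
-- ===== SOURCE B (Python) =====
-- alpha = ['A', 'B', 'C', 'D', 'E', 'F', 'G', 'H', 'I', 'J', 'K', 'L', 'M',
--          'N', 'O', 'P', 'Q', 'R', 'S', 'T', 'U', 'V', 'W', 'X', 'Y', 'Z',
--          '0', '1', '2', '3', '4', '5', '6', '7', '8', '9', ' ']
--
-- def generate_alpha(key_num):
--     new_alpha = list(alpha)
--     for _ in range(key_num % len(alpha)):
--         new_alpha.append(new_alpha.pop(0))
--     return new_alpha
-- ===== Notes on version B (the rewrite author's own statement) =====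
-- stated objective: alternative
-- what changed: Instead of A's 37-iteration index loop with an if/else on i < len and modular indexing, B copies alpha once and performs k = key_num % 37 move-front-to-back rotations (pop(0)/append), building the same rotation by repeated one-step rotation.
import Mathlib
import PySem

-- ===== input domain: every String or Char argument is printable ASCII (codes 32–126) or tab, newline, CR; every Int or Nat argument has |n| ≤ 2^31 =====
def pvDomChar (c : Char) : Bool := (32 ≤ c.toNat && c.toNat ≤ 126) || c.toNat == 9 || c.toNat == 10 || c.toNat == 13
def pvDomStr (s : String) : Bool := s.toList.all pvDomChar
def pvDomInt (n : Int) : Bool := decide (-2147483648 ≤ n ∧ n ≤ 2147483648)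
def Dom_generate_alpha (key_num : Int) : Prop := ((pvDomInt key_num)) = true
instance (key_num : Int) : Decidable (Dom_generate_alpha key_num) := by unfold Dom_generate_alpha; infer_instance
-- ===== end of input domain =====

-- B replaces A's 37-step index/branch loop with k = key_num % 37 successive move-front-to-back rotations (alternative decomposition).

-- the module-level constant `alpha` (shared context of both programs)
def pvAlpha : List String :=
  ["A", "B", "C", "D", "E", "F", "G", "H", "I", "J", "K", "L", "M",
   "N", "O", "P", "Q", "R", "S", "T", "U", "V", "W", "X", "Y", "Z",
   "0", "1", "2", "3", "4", "5", "6", "7", "8", "9", " "]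

-- ===== PORT A =====
-- for i in range(key_num, len(alpha)+key_num): if i < len(alpha): append alpha[i] else: append alpha[i % len(alpha)]
-- (alpha[i] with pyGet?; .getD "" is unreachable under Pre_generate_alpha, where every index is in range)
def generate_alpha (key_num : Int) : List String :=
  (PySem.List.pyRange key_num ((pvAlpha.length : Int) + key_num) 1).foldl
    (fun new_alpha i =>
      if i < (pvAlpha.length : Int) then
        new_alpha ++ [(PySem.List.pyGet? pvAlpha i).getD ""]
      else
        let index := PySem.Int.mod i (pvAlpha.length : Int)
        new_alpha ++ [(PySem.List.pyGet? pvAlpha index).getD ""]) []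

-- ===== PORT B =====
-- new_alpha = list(alpha); for _ in range(key_num % len(alpha)): new_alpha.append(new_alpha.pop(0))
-- (pop(0) never sees an empty list: alpha is nonempty, so the [] branch is unreachable)
def generate_alpha_alt (key_num : Int) : List String :=
  (List.range (PySem.Int.mod key_num (pvAlpha.length : Int)).toNat).foldl
    (fun new_alpha _ =>
      match new_alpha with
      | [] => []
      | x :: xs => xs ++ [x]) pvAlpha

-- ===== PRECONDITION & SPEC =====
-- Pre_ excludes key_num < -37 = -len(alpha), where A's alpha[i] raises IndexError; B still returns there.
def Pre_generate_alpha (key_num : Int) : Prop := -37 ≤ key_num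
instance (key_num : Int) : Decidable (Pre_generate_alpha key_num) := by unfold Pre_generate_alpha; infer_instance
def pvWitness_generate_alpha : Int := (3)

def Spec_generate_alpha (key_num : Int) (out : List String) : Prop := out = generate_alpha_alt key_num
instance (key_num : Int) (out : List String) : Decidable (Spec_generate_alpha key_num out) := by unfold Spec_generate_alpha; infer_instance

-- ===== CLAIM (what is proved, stated in full; the proofs are below) =====
def Claim_equal_generate_alpha : Prop := ∀ (key_num : Int), Dom_generate_alpha key_num → Pre_generate_alpha key_num → Spec_generate_alpha key_num (generate_alpha key_num)

-- ===== LEMMAS AND PROOFS =====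

-- A's loop body, as a function of the loop index
def pvBody (i : Int) : String :=
  if i < (pvAlpha.length : Int) then (PySem.List.pyGet? pvAlpha i).getD ""
  else (PySem.List.pyGet? pvAlpha (PySem.Int.mod i (pvAlpha.length : Int))).getD ""

theorem pvA_eq_map (key_num : Int) :
    generate_alpha key_num
      = ((List.range 37).map (fun (k : Nat) => key_num + (k : Int))).map pvBody := by
  unfold generate_alpha
  have h1 : ((pvAlpha.length : Int) + key_num) = key_num + 37 := by
    simp [pvAlpha]; ring
  rw [h1, PySem.List.pyRange_one]
  have h2 : (key_num + 37 - key_num).toNat = 37 := by omega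
  rw [h2]
  have h3 : ∀ (acc : List String) (i : Int),
      (if i < (pvAlpha.length : Int) then acc ++ [(PySem.List.pyGet? pvAlpha i).getD ""]
       else acc ++ [(PySem.List.pyGet? pvAlpha (PySem.Int.mod i (pvAlpha.length : Int))).getD ""])
      = acc ++ [pvBody i] := by
    intro acc i
    unfold pvBody
    split <;> rfl
  simp only [h3]
  rw [PySem.List.foldl_append_singleton_eq_map]
  rfl

-- Python's negative-index wraparound: xs[i] = xs[i + len(xs)] for -len ≤ i < 0
theorem pvGetShift (xs : List String) (i : Int) (h1 : -(xs.length : Int) ≤ i) (h2 : i < 0) :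
    PySem.List.pyGet? xs i = PySem.List.pyGet? xs (i + xs.length) := by
  simp only [PySem.List.pyGet?, PySem.List.pyIdx?]
  split_ifs <;> first | rfl | omega | (congr 2; omega)

-- for every in-range index, the loop body is alpha[i mod 37]
theorem pvBody_eq_mod (i : Int) (h : -37 ≤ i) :
    pvBody i = (PySem.List.pyGet? pvAlpha (i % 37)).getD "" := by
  have hlen : (pvAlpha.length : Int) = 37 := by simp [pvAlpha]
  have hmod : PySem.Int.mod i (pvAlpha.length : Int) = i % 37 := by
    rw [hlen, PySem.Int.mod_eq_emod_of_pos (by omega)]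
  unfold pvBody
  by_cases h0 : 0 ≤ i
  · by_cases h37 : i < 37
    · rw [if_pos (by omega), show i % 37 = i by omega]
    · rw [if_neg (by omega), hmod]
  · rw [if_pos (by omega),
        pvGetShift pvAlpha i (by omega) (by omega),
        show i % 37 = i + (pvAlpha.length : Int) by rw [hlen]; omega]

-- the canonical rotated form: A's per-index rotation equals drop/take at r
theorem pvCanon (r : Int) (h0 : 0 ≤ r) (h1 : r < 37) :
    (List.range 37).map
        (fun (k : Nat) => (PySem.List.pyGet? pvAlpha ((r + (k : Int)) % 37)).getD "")
      = pvAlpha.drop r.toNat ++ pvAlpha.take r.toNat := by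
  interval_cases r <;> decide

-- r rotate-by-one steps on pvAlpha give drop r ++ take r
theorem pvRot_canon (r : Int) (h0 : 0 ≤ r) (h1 : r < 37) :
    (List.range r.toNat).foldl
        (fun (new_alpha : List String) _ =>
          match new_alpha with
          | [] => []
          | x :: xs => xs ++ [x]) pvAlpha
      = pvAlpha.drop r.toNat ++ pvAlpha.take r.toNat := by
  interval_cases r <;> decide

theorem pvB_eq (key_num : Int) :
    generate_alpha_alt key_num
      = pvAlpha.drop (key_num % 37).toNat ++ pvAlpha.take (key_num % 37).toNat := by
  have hlen : (pvAlpha.length : Int) = 37 := by simp [pvAlpha]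
  have hmod : PySem.Int.mod key_num (pvAlpha.length : Int) = key_num % 37 := by
    rw [hlen, PySem.Int.mod_eq_emod_of_pos (by omega)]
  unfold generate_alpha_alt
  rw [hmod]
  exact pvRot_canon (key_num % 37) (Int.emod_nonneg _ (by omega)) (by omega)

-- ===== VERDICT (by name: the statement is the Claim_ definition above) =====
theorem generate_alpha_spec : Claim_equal_generate_alpha := by
  intro key_num _ hpre
  unfold Spec_generate_alpha
  rw [pvA_eq_map, pvB_eq, List.map_map]
  have hstep : ∀ k ∈ List.range 37,
      (pvBody ∘ fun (k : Nat) => key_num + (k : Int)) k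
        = (PySem.List.pyGet? pvAlpha ((key_num % 37 + (k : Int)) % 37)).getD "" := by
    intro k hk
    show pvBody (key_num + (k : Int)) = _
    rw [pvBody_eq_mod (key_num + (k : Int)) (by unfold Pre_generate_alpha at hpre; omega)]
    congr 2
    omega
  rw [List.map_congr_left hstep]
  exact pvCanon (key_num % 37) (Int.emod_nonneg _ (by omega)) (by omega)
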